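-- pv_equiv track=rewrite | github.com/liskos/leletko | ege05/331.py | f
-- ===== SOURCE A (Python) =====
-- def f(n):
--     b = bin(n)[2:]
--     if n % 2 != 0:
--         b = b.replace("1", "2")
--         b = b.replace("0", "1")
--         b = b.replace("2", "0")
--     c = ""
--     for i in range(len(b)):
--         c = c + b[i] * 2
--     return int(c, 2)
-- ===== SOURCE B (Python) =====
-- def f(n):
--     # val = int(bin(n)[2:], 2): raises ValueError on negative n exactly as A does
--     val = int(bin(n)[2:], 2)
--     # odd: invert all bit_length bits (what A's replace chain does to the string)
--     if n % 2 != 0: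
--         val = (1 << val.bit_length()) - 1 - val
--     # spread each bit of val to position 2*i, then duplicate it (*3)
--     s, p = 0, 1
--     while val > 0:
--         s += (val & 1) * p
--         val >>= 1
--         p <<= 2
--     return 3 * s
-- ===== Notes on version B (the rewrite author's own statement) =====
-- stated objective: alternative
-- what changed: A inverts the odd case by three character replaces, builds a character-doubled binary string and reparses it with int(c, 2); B parses the binary string back to an integer once, inverts arithmetically (all-ones mask minus the value) and computes the bit-doubling purely by arithmetic: spread each bit to the even position with one while loop and multiply by three.
import Mathlib
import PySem

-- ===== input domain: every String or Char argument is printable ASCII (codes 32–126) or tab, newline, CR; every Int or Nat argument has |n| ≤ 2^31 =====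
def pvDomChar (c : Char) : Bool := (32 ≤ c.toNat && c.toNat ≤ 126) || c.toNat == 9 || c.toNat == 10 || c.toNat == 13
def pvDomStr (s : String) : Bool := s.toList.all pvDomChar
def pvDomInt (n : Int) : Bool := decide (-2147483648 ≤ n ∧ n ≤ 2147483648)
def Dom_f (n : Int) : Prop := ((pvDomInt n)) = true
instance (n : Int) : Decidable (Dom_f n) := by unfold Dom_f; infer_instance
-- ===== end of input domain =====

-- B replaces A's build-a-doubled-binary-string-and-reparse by integer arithmetic:
-- parse the binary string once, invert arithmetically for odd n, spread the bits
-- to even positions with one loop and multiply by 3.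

-- ===== PORT A =====
def f (n : Int) : Int :=
  -- b = bin(n)[2:]
  let b := PySem.List.slice (PySem.Int.toBinChars0b n) (some 2) none
  -- if n % 2 != 0: b = b.replace("1","2").replace("0","1").replace("2","0")
  let b := if PySem.Int.mod n 2 ≠ 0 then
      PySem.Chars.replace (PySem.Chars.replace (PySem.Chars.replace b ['1'] ['2']) ['0'] ['1']) ['2'] ['0']
    else b
  -- c = ""; for i in range(len(b)): c = c + b[i] * 2
  let c := (PySem.List.pyRange 0 (PySem.List.len b) 1).foldl
      (fun c i => c ++ [PySem.List.pyGetD b i ' ', PySem.List.pyGetD b i ' ']) ([] : List Char)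
  -- int(c, 2), ported by hand: exact on nonempty strings of '0'/'1' digits, which is every
  -- value c takes on inputs Pre_f admits (on other strings Python raises ValueError)
  c.foldl (fun a ch => 2 * a + (if ch = '1' then 1 else 0)) 0

-- ===== PORT B =====
-- the while loop of Source B: while val > 0: s += (val & 1) * p; val >>= 1; p <<= 2
def spreadLoop (val s p : Int) : Int :=
  if 0 < val then spreadLoop (val >>> (1:Nat)) (s + PySem.Int.band val 1 * p) (p <<< (2:Nat))
  else s
termination_by val.toNat
decreasing_by
  rw [Int.shiftRight_eq_div_pow]
  simp only [pow_one]
  omega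

def f_alt (n : Int) : Int :=
  -- val = int(bin(n)[2:], 2); int(·, 2) ported by hand: exact on nonempty '0'/'1' strings,
  -- which bin(n)[2:] is for every n Pre_f admits (on negative n Python raises ValueError)
  let b := PySem.List.slice (PySem.Int.toBinChars0b n) (some 2) none
  let val := b.foldl (fun a ch => 2 * a + (if ch = '1' then 1 else 0)) (0 : Int)
  -- if n % 2 != 0: val = (1 << val.bit_length()) - 1 - val
  let val := if PySem.Int.mod n 2 ≠ 0 then ((1:Int) <<< PySem.Int.bitLength val) - 1 - val else val
  -- s, p = 0, 1; while val > 0: …; return 3 * s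
  3 * spreadLoop val 0 1

-- ===== PRECONDITION & SPEC =====
-- Pre_f excludes exactly the negative n: there bin(n)[2:] keeps the 'b' of '-0b…',
-- so A's int(c, 2) raises ValueError (and B's int(bin(n)[2:], 2) raises there too).
def Pre_f (n : Int) : Prop := 0 ≤ n
instance (n : Int) : Decidable (Pre_f n) := by unfold Pre_f; infer_instance
def pvWitness_f : Int := 5

def Spec_f (n : Int) (out : Int) : Prop := out = f_alt n
instance (n : Int) (out : Int) : Decidable (Spec_f n out) := by unfold Spec_f; infer_instance

-- ===== CLAIM (what is proved, stated in full; the proofs are below) =====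
def Claim_equal_f : Prop := ∀ (n : Int), Dom_f n → Pre_f n → Spec_f n (f n)

-- ===== LEMMAS AND PROOFS =====

-- binary digits of a natural number, most significant first ([] for 0)
def bdigs : Nat → List Nat
  | 0 => []
  | m + 1 => bdigs ((m + 1) / 2) ++ [(m + 1) % 2]
decreasing_by omega

-- what bin() prints: "0" for 0, the digits otherwise
def bdigs1 (m : Nat) : List Nat := if m = 0 then [0] else bdigs m

-- bit-spread: the bits of m moved to the even positions (base-4 reading of the bits)
def spread : Nat → Nat
  | 0 => 0
  | m + 1 => (m + 1) % 2 + 4 * spread ((m + 1) / 2)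
decreasing_by omega

-- value of a digit list read in base 2
def nval2 (l : List Nat) : Nat := l.foldl (fun a d => 2 * a + d) 0

lemma bdigs_pos (m : Nat) (h : 0 < m) : bdigs m = bdigs (m / 2) ++ [m % 2] := by
  cases m with
  | zero => omega
  | succ k => rw [bdigs]

lemma spread_pos (m : Nat) (h : 0 < m) : spread m = m % 2 + 4 * spread (m / 2) := by
  cases m with
  | zero => omega
  | succ k => rw [spread]

lemma bdigs_le_one (m : Nat) : ∀ d ∈ bdigs m, d ≤ 1 := by
  induction m using Nat.strong_induction_on with
  | _ m ih =>
    match m with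
    | 0 => simp [bdigs]
    | k + 1 =>
      rw [bdigs]
      intro d hd
      rcases List.mem_append.1 hd with h | h
      · exact ih ((k+1)/2) (by omega) d h
      · simp at h; omega

lemma bdigs1_le_one (m : Nat) : ∀ d ∈ bdigs1 m, d ≤ 1 := by
  unfold bdigs1
  split
  · simp
  · exact bdigs_le_one m

lemma nval2_append (l : List Nat) (d : Nat) : nval2 (l ++ [d]) = 2 * nval2 l + d := by
  simp [nval2, List.foldl_append]

lemma nval2_bdigs (m : Nat) : nval2 (bdigs m) = m := by
  induction m using Nat.strong_induction_on with
  | _ m ih =>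
    match m with
    | 0 => simp [bdigs, nval2]
    | k + 1 =>
      rw [bdigs, nval2_append, ih ((k+1)/2) (by omega)]
      omega

lemma nval2_bdigs1 (m : Nat) : nval2 (bdigs1 m) = m := by
  unfold bdigs1
  split
  · simp_all [nval2]
  · exact nval2_bdigs m

lemma spread_two_mul_add (v d : Nat) (hd : d ≤ 1) : spread (2 * v + d) = d + 4 * spread v := by
  rcases Nat.eq_zero_or_pos (2 * v + d) with h | h
  · have hv : v = 0 := by omega
    have hd0 : d = 0 := by omega
    simp [hv, hd0, spread]
  · rw [spread_pos _ h]
    have h1 : (2 * v + d) % 2 = d := by omega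
    have h2 : (2 * v + d) / 2 = v := by omega
    rw [h1, h2]

-- base-4 reading of a binary digit list = spread of its value
lemma fold4_eq_spread (l : List Nat) (h : ∀ d ∈ l, d ≤ 1) :
    l.foldl (fun a d => 4 * a + d) 0 = spread (nval2 l) := by
  induction l using List.reverseRecOn with
  | nil => simp [nval2, spread]
  | append_singleton l d ih =>
    have hd : d ≤ 1 := h d (by simp)
    rw [List.foldl_append, nval2_append, spread_two_mul_add _ _ hd,
      ih (fun x hx => h x (by simp [hx]))]
    simp only [List.foldl_cons, List.foldl_nil]
    omega

-- complementing every digit: sum of the two values is 2^length - 1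
lemma nval2_flip (l : List Nat) (h : ∀ d ∈ l, d ≤ 1) :
    nval2 (l.map (fun d => 1 - d)) + nval2 l + 1 = 2 ^ l.length := by
  induction l using List.reverseRecOn with
  | nil => simp [nval2]
  | append_singleton l d ih =>
    have hd : d ≤ 1 := h d (by simp)
    have ih' := ih (fun x hx => h x (by simp [hx]))
    rw [List.map_append, List.map_singleton, nval2_append, nval2_append,
      List.length_append, List.length_singleton, pow_succ]
    omega

lemma bdigs_length (m : Nat) (h : 0 < m) :
    (bdigs m).length = PySem.Int.bitLength (m : Int) := by
  induction m using Nat.strong_induction_on with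
  | _ m ih =>
    rw [bdigs_pos m h, PySem.Int.bitLength_natCast h, List.length_append, List.length_singleton]
    rcases Nat.eq_zero_or_pos (m / 2) with h2 | h2
    · simp [h2, bdigs, PySem.Int.bitLength_zero]
    · rw [ih (m / 2) (by omega) h2]

-- Nat.toDigits 2 prints exactly the digits bdigs1
lemma toDigitsCore_two (fuel : Nat) : ∀ (m : Nat) (acc : List Char), m < fuel →
    Nat.toDigitsCore 2 fuel m acc = (bdigs1 m).map Nat.digitChar ++ acc := by
  induction fuel with
  | zero => intro m acc h; omega
  | succ fuel ih =>
    intro m acc h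
    simp only [Nat.toDigitsCore]
    by_cases h2 : m / 2 = 0
    · have : m = 0 ∨ m = 1 := by omega
      rcases this with rfl | rfl <;> simp [h2, bdigs1, bdigs, Nat.digitChar]
    · have hm : 2 ≤ m := by omega
      rw [if_neg h2, ih (m / 2) _ (by omega)]
      have h1 : bdigs1 m = bdigs m := by unfold bdigs1; rw [if_neg (by omega)]
      have h3 : bdigs1 (m / 2) = bdigs (m / 2) := by unfold bdigs1; rw [if_neg h2]
      rw [h1, h3, bdigs_pos m (by omega)]
      simp

lemma toDigits_two (m : Nat) : Nat.toDigits 2 m = (bdigs1 m).map Nat.digitChar := by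
  rw [Nat.toDigits, toDigitsCore_two (m + 1) m [] (by omega), List.append_nil]

-- single-character str.replace is a map
lemma replace_go_single (o c2 : Char) : ∀ (fuel : Nat) (s acc : List Char), s.length ≤ fuel →
    PySem.Chars.replace.go [o] [c2] fuel s acc
      = acc.reverse ++ s.map (fun c => if c = o then c2 else c) := by
  intro fuel
  induction fuel with
  | zero =>
    intro s acc h
    have : s = [] := by cases s <;> simp_all
    subst this
    simp [PySem.Chars.replace.go]
  | succ fuel ih =>
    intro s acc h
    cases s with
    | nil => simp [PySem.Chars.replace.go]
    | cons c t =>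
      simp only [PySem.Chars.replace.go]
      by_cases hc : c = o
      · subst hc
        rw [if_pos (by simp [List.isPrefixOf])]
        rw [ih _ _ (by simpa using h)]
        simp
      · rw [if_neg (by simp [List.isPrefixOf]; exact fun hh => hc hh.symm)]
        rw [ih _ _ (by simpa using h)]
        simp [hc]

lemma replace_single (s : List Char) (o c2 : Char) :
    PySem.Chars.replace s [o] [c2] = s.map (fun c => if c = o then c2 else c) := by
  rw [PySem.Chars.replace]
  rw [if_neg (by simp)]
  simpa using replace_go_single o c2 s.length s [] le_rfl

-- the three replaces compose to digit complement on '0'/'1' strings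
lemma triple_replace (l : List Nat) (h : ∀ d ∈ l, d ≤ 1) :
    PySem.Chars.replace (PySem.Chars.replace (PySem.Chars.replace
        (l.map Nat.digitChar) ['1'] ['2']) ['0'] ['1']) ['2'] ['0']
      = (l.map (fun d => 1 - d)).map Nat.digitChar := by
  simp only [replace_single, List.map_map]
  apply List.map_congr_left
  intro d hd
  have : d = 0 ∨ d = 1 := by have := h d hd; omega
  rcases this with rfl | rfl <;> decide

-- parsing the character-doubled string in base 2 = base-4 fold with tripled digits
lemma parse_dup (b : List Char) : ∀ (a : Int),
    (b.flatMap (fun x => [x, x])).foldl (fun a ch => 2 * a + (if ch = '1' then 1 else 0)) a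
      = b.foldl (fun a ch => 4 * a + 3 * (if ch = '1' then 1 else 0)) a := by
  induction b with
  | nil => intro a; simp
  | cons x b ih =>
    intro a
    simp only [List.flatMap_cons, List.cons_append, List.nil_append, List.foldl_cons, ih]
    congr 1
    ring

-- the tripled base-4 fold over printed digits = 3 * the plain base-4 fold over the digits
lemma fold4_map (l : List Nat) (h : ∀ d ∈ l, d ≤ 1) : ∀ (a : Nat),
    (l.map Nat.digitChar).foldl (fun (x : Int) ch => 4 * x + 3 * (if ch = '1' then 1 else 0))
        (3 * (a : Int))
      = 3 * ((l.foldl (fun x d => 4 * x + d) a : Nat) : Int) := by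
  induction l with
  | nil => intro a; simp
  | cons d l ih =>
    intro a
    have hd : d = 0 ∨ d = 1 := by have := h d (by simp); omega
    have hbit : (if Nat.digitChar d = '1' then (1:Int) else 0) = (d : Int) := by
      rcases hd with rfl | rfl <;> decide
    simp only [List.map_cons, List.foldl_cons, hbit]
    have : 4 * (3 * (a:Int)) + 3 * (d:Int) = 3 * ((4 * a + d : Nat) : Int) := by push_cast; ring
    rw [this, ih (fun x hx => h x (by simp [hx]))]

-- B's base-2 parse of printed digits = the value of the digit list
lemma parse2_map (l : List Nat) (h : ∀ d ∈ l, d ≤ 1) : ∀ (a : Nat),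
    (l.map Nat.digitChar).foldl (fun (x : Int) ch => 2 * x + (if ch = '1' then 1 else 0)) (a : Int)
      = ((l.foldl (fun x d => 2 * x + d) a : Nat) : Int) := by
  induction l with
  | nil => intro a; simp
  | cons d l ih =>
    intro a
    have hd : d = 0 ∨ d = 1 := by have := h d (by simp); omega
    have hbit : (if Nat.digitChar d = '1' then (1:Int) else 0) = (d : Int) := by
      rcases hd with rfl | rfl <;> decide
    simp only [List.map_cons, List.foldl_cons, hbit]
    have : 2 * (a:Int) + (d:Int) = ((2 * a + d : Nat) : Int) := by push_cast; ring
    rw [this, ih (fun x hx => h x (by simp [hx]))]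

-- A's value on the printed digit list l
lemma a_side (l : List Nat) (h : ∀ d ∈ l, d ≤ 1) :
    ((l.map Nat.digitChar).flatMap (fun x => [x, x])).foldl
        (fun a ch => 2 * a + (if ch = '1' then 1 else 0)) 0
      = 3 * ((spread (nval2 l) : Nat) : Int) := by
  rw [parse_dup]
  have h0 := fold4_map l h 0
  simp only [Nat.cast_zero, mul_zero] at h0
  rw [h0, fold4_eq_spread l h]

-- the c-building loop of A is character doubling
lemma c_loop (b : List Char) :
    (PySem.List.pyRange 0 (PySem.List.len b) 1).foldl
        (fun c i => c ++ [PySem.List.pyGetD b i ' ', PySem.List.pyGetD b i ' ']) ([] : List Char)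
      = b.flatMap (fun x => [x, x]) := by
  rw [PySem.List.len_eq]
  rw [PySem.List.foldl_pyRange_zero_pyGetD' b ' ' (fun acc x => acc ++ [x, x]) []]
  rw [PySem.List.foldl_append_eq_flatMap]
  simp

-- B's loop computes spread
lemma spreadLoop_eq (v : Nat) : ∀ (s p : Int),
    spreadLoop ((v : Nat) : Int) s p = s + p * ((spread v : Nat) : Int) := by
  induction v using Nat.strong_induction_on with
  | _ v ih =>
    intro s p
    rcases Nat.eq_zero_or_pos v with rfl | hv
    · rw [spreadLoop]
      simp [spread]
    · rw [spreadLoop, if_pos (by exact_mod_cast hv)]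
      have h1 : ((v : Int) >>> (1:Nat)) = ((v / 2 : Nat) : Int) := by
        rw [Int.shiftRight_eq_div_pow]
        simp
      have h2 : PySem.Int.band (v : Int) 1 = ((v % 2 : Nat) : Int) := by
        rw [show (1 : Int) = ((1 : Nat) : Int) by norm_num, PySem.Int.band_natCast]
        congr 1
        simp [Nat.and_one_is_mod]
      rw [h1, h2, ih (v / 2) (by omega)]
      rw [spread_pos v hv]
      have h3 : p <<< (2:Nat) = p * 4 := by
        rw [Int.shiftLeft_eq]
        norm_num
      rw [h3]
      push_cast
      ring

-- ===== VERDICT (by name: the statement is the Claim_ definition above) =====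
theorem f_spec : Claim_equal_f := by
  intro n _ hpre
  unfold Pre_f at hpre
  unfold Spec_f
  obtain ⟨m, rfl⟩ : ∃ m : Nat, n = (m : Int) := ⟨n.toNat, (Int.toNat_of_nonneg hpre).symm⟩
  have hslice : PySem.List.slice (PySem.Int.toBinChars0b (m : Int)) (some 2) none
      = (bdigs1 m).map Nat.digitChar := by
    rw [PySem.Int.toBinChars0b, if_neg (by omega), PySem.List.slice_from _ (by norm_num)]
    simp [Int.toNat, toDigits_two]
  have hmod : PySem.Int.mod (m : Int) 2 = ((m % 2 : Nat) : Int) := by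
    exact_mod_cast PySem.Int.mod_natCast m 2
  have hparse : ((bdigs1 m).map Nat.digitChar).foldl
      (fun (a : Int) ch => 2 * a + (if ch = '1' then 1 else 0)) 0 = ((m : Nat) : Int) := by
    have := parse2_map (bdigs1 m) (bdigs1_le_one m) 0
    simp only [Nat.cast_zero] at this
    rw [this]
    have : (bdigs1 m).foldl (fun x d => 2 * x + d) 0 = nval2 (bdigs1 m) := rfl
    rw [this, nval2_bdigs1]
  rcases Nat.mod_two_eq_zero_or_one m with hme | hmo
  · -- even: no inversion, val = m
    have hm0 : PySem.Int.mod (m : Int) 2 = 0 := by rw [hmod, hme]; norm_num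
    rw [f, f_alt]
    rw [if_neg (not_not_intro hm0), hslice, hparse, if_neg (not_not_intro hm0)]
    rw [c_loop, a_side (bdigs1 m) (bdigs1_le_one m), nval2_bdigs1, spreadLoop_eq]
    ring
  · -- odd: the replace chain inverts the digits, val = 2^bit_length - 1 - m
    have hm1 : PySem.Int.mod (m : Int) 2 = 1 := by rw [hmod, hmo]; norm_num
    have hmpos : 0 < m := by omega
    have hb1 : bdigs1 m = bdigs m := by unfold bdigs1; rw [if_neg (by omega)]
    set l' : List Nat := (bdigs m).map (fun d => 1 - d) with hl'
    have hl'le : ∀ d ∈ l', d ≤ 1 := by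
      intro d hd
      simp [hl'] at hd
      omega
    have hflip : nval2 l' + m + 1 = 2 ^ (bdigs m).length := by
      have := nval2_flip (bdigs m) (bdigs_le_one m)
      rwa [nval2_bdigs] at this
    have hlen : (bdigs m).length = PySem.Int.bitLength (m : Int) := bdigs_length m hmpos
    have hne : PySem.Int.mod (m : Int) 2 ≠ 0 := by rw [hm1]; norm_num
    rw [f, f_alt]
    rw [hb1] at hparse
    rw [if_pos hne, hslice, hb1, hparse, if_pos hne]
    rw [triple_replace (bdigs m) (bdigs_le_one m)]
    rw [c_loop, a_side l' hl'le]
    have hval : ((1:Int) <<< PySem.Int.bitLength ((m : Nat) : Int)) - 1 - ((m : Nat) : Int)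
        = ((nval2 l' : Nat) : Int) := by
      rw [Int.shiftLeft_eq, ← hlen]
      have h2 : ((2 : Int) ^ (bdigs m).length) = ((2 ^ (bdigs m).length : Nat) : Int) := by
        push_cast; ring
      rw [one_mul, h2]
      omega
    rw [hval, spreadLoop_eq]
    ring
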